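-- pv_equiv track=rewrite | github.com/NineTailed9/Coder | matrix_operations.py | join_matrix_in_one
-- ===== SOURCE A (Python) =====
-- from copy import deepcopy
--
-- def join_matrix_in_one(first_matrix: list, second_matrix: list):
--     rows_first = len(first_matrix)
--     columns_first = len(first_matrix[0])
--     rows_second = len(second_matrix)
--     columns_second = len(second_matrix[0])
--
--     if (rows_first > rows_second) and (columns_first == columns_second):
--         second_matrix = deepcopy(second_matrix)
--
--         for i in range(1, rows_first - rows_second + 1):
--             rows_second = len(second_matrix)
--             for row_index in range(0, rows_second):
--                 second_matrix[row_index].append(0)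
--
--             second_matrix.append([])
--             for j in range(0, len(second_matrix[0]) - 1):
--                 second_matrix[len(second_matrix) - 1].append(0)
--             second_matrix[len(second_matrix) - 1].append(1)
--         columns_second = len(second_matrix[0])
--     if columns_second > rows_first:
--         second_matrix = deepcopy(second_matrix)
--
--         for row_index in range(0, rows_second):
--             second_matrix[row_index].pop()
--         second_matrix.pop()
--
--         rows_second = len(second_matrix)
--         columns_second = len(second_matrix[0])
--
--     combined_matrix = []
--     for row_index in range(0, rows_first):
--         combined_matrix.append([])
--         for column_index in range(0, columns_first):
--             combined_matrix[row_index].append(first_matrix[row_index][column_index])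
--         for column_index in range(0, columns_second):
--             combined_matrix[row_index].append(second_matrix[row_index][column_index])
--
--     return combined_matrix
-- ===== SOURCE B (Python) =====
-- def join_matrix_in_one(first_matrix: list, second_matrix: list):
--     rows_first = len(first_matrix)
--     columns_first = len(first_matrix[0])
--     rows_second = len(second_matrix)
--     columns_second = len(second_matrix[0])
--
--     # never materialize the padded/trimmed second matrix: compute the final
--     # number of joined columns, and each joined cell from an index formula
--     d = rows_first - rows_second if (rows_first > rows_second
--                                      and columns_first == columns_second) else 0
--     joined_columns = columns_second + d
--     if joined_columns > rows_first:
--         joined_columns -= 1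
--
--     def cell(i, j):
--         if i < rows_second:
--             row = second_matrix[i]
--             return row[j] if j < len(row) else 0
--         return 1 if j == columns_second + (i - rows_second) else 0
--
--     return [[first_matrix[i][j] for j in range(columns_first)]
--             + [cell(i, j) for j in range(joined_columns)]
--             for i in range(rows_first)]
-- ===== Notes on version B (the rewrite author's own statement) =====
-- stated objective: alternative
-- what changed: B never builds the intermediate second matrix at all: instead of A's three staged mutation passes (grow every row and append identity-style rows one element at a time, then pop a column and a row, then copy element by element), B computes the final joined column count arithmetically and emits each output cell directly from an index formula (original entry, padding zero, or the 1/0 of an appended identity row).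
import Mathlib
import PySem

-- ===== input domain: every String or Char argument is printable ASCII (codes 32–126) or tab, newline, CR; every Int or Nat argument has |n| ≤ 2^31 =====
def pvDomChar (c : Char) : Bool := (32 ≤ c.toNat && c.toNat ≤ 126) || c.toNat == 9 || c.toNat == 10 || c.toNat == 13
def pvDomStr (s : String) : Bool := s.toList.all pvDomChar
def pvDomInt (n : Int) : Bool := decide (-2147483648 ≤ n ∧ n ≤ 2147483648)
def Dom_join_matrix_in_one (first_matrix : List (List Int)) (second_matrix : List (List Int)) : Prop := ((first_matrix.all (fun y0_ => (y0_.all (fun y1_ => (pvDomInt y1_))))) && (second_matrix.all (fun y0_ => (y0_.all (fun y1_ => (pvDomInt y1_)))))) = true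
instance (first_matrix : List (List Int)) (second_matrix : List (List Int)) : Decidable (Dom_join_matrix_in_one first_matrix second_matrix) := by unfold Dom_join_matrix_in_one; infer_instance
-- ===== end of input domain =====

-- B never materializes the padded/trimmed second matrix: it computes the final joined
-- column count and each joined cell directly by an index formula (objective: alternative).


-- ===== PORT A =====
-- one padding iteration of A's `for i in range(1, rows_first - rows_second + 1)` loop:
-- records rows_second := len(second_matrix), appends 0 to every row, appends [], then
-- grows the new last row by appending len(second_matrix[0]) - 1 zeros and a final 1.
def joinPadStepA (st : List (List Int) × Nat) : List (List Int) × Nat :=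
  let sm := st.1
  let rs := sm.length
  let sm := sm.map (fun row => row ++ [0])
  let sm := sm ++ [[]]
  let last := (List.range ((sm.headD []).length - 1)).foldl
                (fun (r : List Int) _ => r ++ [0]) []
  let last := last ++ [(1 : Int)]
  (sm.dropLast ++ [last], rs)

def join_matrix_in_one (first_matrix : List (List Int)) (second_matrix : List (List Int)) : List (List Int) :=
  let rows_first := first_matrix.length
  let columns_first := (first_matrix.headD []).length      -- len(first_matrix[0]); Pre_ gives first_matrix ≠ []
  let rows_second := second_matrix.length
  let columns_second := (second_matrix.headD []).length    -- len(second_matrix[0]); Pre_ gives second_matrix ≠ []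
  let st :=
    if rows_second < rows_first ∧ columns_first = columns_second then
      let st := (List.range (rows_first - rows_second)).foldl
                  (fun st _ => joinPadStepA st) (second_matrix, rows_second)
      (st.1, st.2, (st.1.headD []).length)                 -- columns_second = len(second_matrix[0])
    else (second_matrix, rows_second, columns_second)
  let second_matrix := st.1
  let rows_second := st.2.1
  let columns_second := st.2.2
  let st :=
    if rows_first < columns_second then
      -- for row_index in range(0, rows_second): second_matrix[row_index].pop()
      let sm := (List.range rows_second).foldl
                  (fun (s : List (List Int)) ri => s.set ri ((s.getD ri []).dropLast)) second_matrix
      let sm := sm.dropLast                                -- second_matrix.pop()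
      (sm, (sm.headD []).length)
    else (second_matrix, columns_second)
  let second_matrix := st.1
  let columns_second := st.2
  (List.range rows_first).foldl (fun acc ri =>
    acc ++ [ (List.range columns_first).foldl
               (fun row ci => row ++ [(first_matrix.getD ri []).getD ci 0]) []
             ++ (List.range columns_second).foldl
               (fun row ci => row ++ [(second_matrix.getD ri []).getD ci 0]) [] ]) []

-- ===== PORT B =====
-- joined cell (i, j) of the (conceptual) second block: an original entry, a padding
-- zero, or the 1/0 of an appended identity-style row — computed from indices alone.
def jmCellB (second_matrix : List (List Int)) (rows_second columns_second : Nat)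
    (i j : Nat) : Int :=
  if i < rows_second then
    let row := second_matrix.getD i []
    if j < row.length then row.getD j 0 else 0
  else if j = columns_second + (i - rows_second) then 1 else 0

def join_matrix_in_one_alt (first_matrix : List (List Int)) (second_matrix : List (List Int)) : List (List Int) :=
  let rows_first := first_matrix.length
  let columns_first := (first_matrix.headD []).length
  let rows_second := second_matrix.length
  let columns_second := (second_matrix.headD []).length
  let d := if rows_second < rows_first ∧ columns_first = columns_second then
             rows_first - rows_second else 0
  let joined_columns := columns_second + d
  let joined_columns := if rows_first < joined_columns then joined_columns - 1
                        else joined_columns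
  (List.range rows_first).map (fun i =>
    (List.range columns_first).map (fun j => (first_matrix.getD i []).getD j 0)
    ++ (List.range joined_columns).map (fun j => jmCellB second_matrix rows_second columns_second i j))

-- ===== PRECONDITION & SPEC =====
-- Pre_ excludes exactly the inputs on which the Python A raises: an empty matrix
-- (len of matrix[0]), a first-matrix row shorter than columns_first, and per branch the
-- shapes whose index/pop loops run past a row or past the end of the second matrix
-- (including the pad-then-pop combination, which always leaves one row too few).
def Pre_join_matrix_in_one (first_matrix : List (List Int)) (second_matrix : List (List Int)) : Prop :=
  first_matrix ≠ [] ∧ second_matrix ≠ [] ∧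
  (∀ r ∈ first_matrix, (first_matrix.headD []).length ≤ r.length) ∧
  (let rf := first_matrix.length
   let cf := (first_matrix.headD []).length
   let rs := second_matrix.length
   let cs := (second_matrix.headD []).length
   if rs < rf ∧ cf = cs then
     cf ≤ rs ∧ ∀ r ∈ second_matrix, cs ≤ r.length
   else if rf < cs then
     rf < rs ∧ (∀ r ∈ second_matrix, 1 ≤ r.length) ∧
       (∀ r ∈ second_matrix.take rf, cs ≤ r.length)
   else
     cs = 0 ∨ (rf ≤ rs ∧ ∀ r ∈ second_matrix.take rf, cs ≤ r.length))
instance (first_matrix : List (List Int)) (second_matrix : List (List Int)) : Decidable (Pre_join_matrix_in_one first_matrix second_matrix) := by unfold Pre_join_matrix_in_one; infer_instance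

def pvWitness_join_matrix_in_one : List (List Int) × List (List Int) := ([[1]], [[2]])

def Spec_join_matrix_in_one (first_matrix : List (List Int)) (second_matrix : List (List Int)) (out : List (List Int)) : Prop := out = join_matrix_in_one_alt first_matrix second_matrix
instance (first_matrix : List (List Int)) (second_matrix : List (List Int)) (out : List (List Int)) : Decidable (Spec_join_matrix_in_one first_matrix second_matrix out) := by unfold Spec_join_matrix_in_one; infer_instance

-- ===== CLAIM (what is proved, stated in full; the proofs are below) =====
def Claim_equal_join_matrix_in_one : Prop := ∀ (first_matrix : List (List Int)) (second_matrix : List (List Int)), Dom_join_matrix_in_one first_matrix second_matrix → Pre_join_matrix_in_one first_matrix second_matrix → Spec_join_matrix_in_one first_matrix second_matrix (join_matrix_in_one first_matrix second_matrix)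

-- ===== LEMMAS AND PROOFS =====
lemma jm_zero_fold (m : Nat) :
    (List.range m).foldl (fun (r : List Int) _ => r ++ [0]) [] = List.replicate m (0 : Int) := by
  rw [PySem.List.foldl_append_singleton_eq_map (fun _ => (0:Int))]
  rw [List.nil_append]
  induction m with
  | zero => rfl
  | succ k ih => rw [List.range_succ, List.map_append, ih, List.replicate_succ']; rfl

lemma jm_step (b : List Int) (rest : List (List Int)) (r : Nat) :
    joinPadStepA ((b :: rest), r) =
      ((b ++ [0]) :: (rest.map (fun row => row ++ [0]) ++ [List.replicate b.length (0:Int) ++ [1]]),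
       rest.length + 1) := by
  simp only [joinPadStepA, List.map_cons, List.cons_append, List.headD_cons, List.length_cons,
    List.length_append, jm_zero_fold]
  rw [show ((b ++ [0]) :: (rest.map (fun row => row ++ [0]) ++ [[]]))
        = ((b ++ [0]) :: rest.map (fun row => row ++ [0])) ++ [[]] from by simp,
     List.dropLast_concat]
  simp

lemma jm_pad (a : List Int) (t : List (List Int)) (k : Nat) :
    ((List.range k).foldl (fun st _ => joinPadStepA st) (a :: t, (a :: t).length)) =
    ((a :: t).map (fun row => row ++ List.replicate k 0)
      ++ (List.range k).map (fun j => List.replicate (a.length + j) (0:Int) ++ [1] ++ List.replicate (k - 1 - j) 0),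
     if k = 0 then (a :: t).length else (a :: t).length + k - 1) := by
  induction k with
  | zero => simp
  | succ k ih =>
    rw [List.range_succ, List.foldl_append, ih]
    simp only [List.foldl_cons, List.foldl_nil, List.map_cons, List.cons_append]
    rw [jm_step]
    refine Prod.ext ?_ ?_
    · simp only [List.map_append, List.map_map, List.map_cons,
        List.length_append, List.length_replicate, List.map_nil]
      rw [show k + 1 - 1 - k = 0 from by omega]
      simp only [List.replicate_zero, List.append_nil]
      congr 1
      · rw [List.append_assoc, ← List.replicate_succ']
      rw [List.append_assoc]
      congr 1
      · apply List.map_congr_left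
        intro row _
        simp [List.append_assoc, List.replicate_succ']
      congr 1
      apply List.map_congr_left
      intro j hj
      have hj' : j < k := List.mem_range.mp hj
      simp only [Function.comp_apply]
      rw [show k + 1 - 1 - j = (k - 1 - j) + 1 from by omega, List.replicate_succ']
      simp [List.append_assoc]
    · simp only [List.length_append, List.length_map, List.length_cons, List.length_range]
      rw [if_neg (by omega)]
      omega

lemma jm_pop (sm : List (List Int)) (n : Nat) (h : n ≤ sm.length) :
    (List.range n).foldl (fun s ri => s.set ri ((s.getD ri []).dropLast)) sm
      = (sm.take n).map List.dropLast ++ sm.drop n := by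
  induction n with
  | zero => simp
  | succ k ih =>
    have hk : k < sm.length := by omega
    rw [List.range_succ, List.foldl_append, ih (by omega)]
    simp only [List.foldl_cons, List.foldl_nil]
    have hlen : ((sm.take k).map List.dropLast).length = k := by
      simp [Nat.min_eq_left (le_of_lt hk)]
    rw [List.drop_eq_getElem_cons hk]
    have hget : (((sm.take k).map List.dropLast) ++ sm[k] :: sm.drop (k+1)).getD k [] = sm[k] := by
      rw [List.getD_eq_getElem?_getD, List.getElem?_append_right (by omega), hlen]
      simp [List.getElem?_eq_getElem hk]
    rw [hget, List.set_append_right _ _ (by omega), hlen, Nat.sub_self, List.set_cons_zero]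
    rw [List.take_succ_eq_append_getElem hk, List.map_append, List.map_singleton, List.append_assoc]
    rfl

-- A's combine loops, rewritten as nested maps over ranges (shape only, no hypotheses)
lemma jm_combine (f sm : List (List Int)) (cf c2 rf : Nat) :
    (List.range rf).foldl (fun acc ri =>
      acc ++ [ (List.range cf).foldl (fun row ci => row ++ [(f.getD ri []).getD ci 0]) []
               ++ (List.range c2).foldl (fun row ci => row ++ [(sm.getD ri []).getD ci 0]) [] ]) []
    = (List.range rf).map (fun i =>
        (List.range cf).map (fun j => (f.getD i []).getD j 0)
        ++ (List.range c2).map (fun j => (sm.getD i []).getD j 0)) := by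
  rw [PySem.List.foldl_append_singleton_eq_map, List.nil_append]
  apply List.map_congr_left
  intro i _
  rw [PySem.List.foldl_append_singleton_eq_map, List.nil_append,
      PySem.List.foldl_append_singleton_eq_map, List.nil_append]

lemma jm_getD_repl (n j : Nat) : (List.replicate n (0:Int)).getD j 0 = 0 := by
  rw [List.getD_eq_getElem?_getD, List.getElem?_replicate]
  split <;> rfl

lemma jm_cell_left (row : List Int) (d j : Nat) :
    (row ++ List.replicate d (0:Int)).getD j 0 = if j < row.length then row.getD j 0 else 0 := by
  by_cases h : j < row.length
  · rw [List.getD_append _ _ _ _ h, if_pos h]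
  · rw [List.getD_append_right _ _ _ _ (by omega), jm_getD_repl, if_neg h]

lemma jm_cell_id (cs m j : Nat) :
    (List.replicate cs (0:Int) ++ [1] ++ List.replicate m 0).getD j 0
      = if j = cs then 1 else 0 := by
  rw [List.append_assoc]
  by_cases h : j < cs
  · rw [List.getD_append _ _ _ _ (by simpa using h), jm_getD_repl, if_neg (by omega)]
  · rw [List.getD_append_right _ _ _ _ (by simpa using h), List.length_replicate]
    by_cases he : j = cs
    · rw [if_pos he, he, Nat.sub_self]; rfl
    · rw [if_neg he]
      have : j - cs = (j - cs - 1) + 1 := by omega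
      rw [this]
      show (List.replicate m (0:Int)).getD (j - cs - 1) 0 = 0
      exact jm_getD_repl _ _

lemma jm_getD_dropLast {A : Type} (L : List A) (dflt : A) (i : Nat) (h : i < L.length - 1) :
    L.dropLast.getD i dflt = L.getD i dflt := by
  rw [List.getD_eq_getElem _ _ (by simp; omega), List.getD_eq_getElem _ _ (by omega),
      List.getElem_dropLast]

lemma jm_getD_map (L : List (List Int)) (i : Nat) (h : i < L.length) :
    (List.map List.dropLast L).getD i [] = (L.getD i []).dropLast := by
  rw [List.getD_eq_getElem _ _ (by simpa using h), List.getElem_map,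
      List.getD_eq_getElem _ _ h]

lemma jm_pad_cell (b : List Int) (u : List (List Int)) (d i j : Nat)
    (hi : i < u.length + 1 + d) :
    ((((b :: u).map (fun row => row ++ List.replicate d 0)
       ++ (List.range d).map (fun j' => List.replicate (b.length + j') (0:Int) ++ [1]
             ++ List.replicate (d - 1 - j') 0)).getD i []).getD j 0)
    = jmCellB (b :: u) (u.length + 1) b.length i j := by
  by_cases hir : i < u.length + 1
  · rw [List.getD_eq_getElem?_getD, List.getD_eq_getElem?_getD,
        List.getElem?_append_left (by simpa using hir),
        List.getElem?_map,
        show (b :: u)[i]? = some ((b :: u)[i]'hir) from List.getElem?_eq_getElem hir]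
    simp only [Option.map_some, Option.getD_some]
    rw [← List.getD_eq_getElem?_getD, jm_cell_left]
    simp only [jmCellB, if_pos hir, List.getD_eq_getElem (b :: u) [] hir]
  · rw [List.getD_eq_getElem?_getD, List.getD_eq_getElem?_getD,
        List.getElem?_append_right (by simpa using hir)]
    simp only [List.length_map, List.length_cons]
    rw [List.getElem?_map, List.getElem?_eq_getElem (by simp; omega : i - (u.length + 1) < (List.range d).length)]
    simp only [List.getElem_range, Option.map_some, Option.getD_some]
    rw [← List.getD_eq_getElem?_getD, jm_cell_id]
    simp only [jmCellB, if_neg hir]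
lemma jm_take_mem {α : Type} (l : List α) (n i : Nat) (h : i < n) (h2 : i < l.length) :
    l[i] ∈ l.take n := by
  have e : (l.take n)[i]'(by simp; omega) = l[i] := List.getElem_take
  exact e ▸ List.getElem_mem _

-- ===== VERDICT (by name: the statement is the Claim_ definition above) =====
theorem join_matrix_in_one_spec : Claim_equal_join_matrix_in_one := by
  intro f s _ hpre
  obtain ⟨hf0, hs0, hfrow, hmain⟩ := hpre
  obtain ⟨a, t, rfl⟩ := List.exists_cons_of_ne_nil hf0
  obtain ⟨b, u, rfl⟩ := List.exists_cons_of_ne_nil hs0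
  simp only [Spec_join_matrix_in_one, join_matrix_in_one, join_matrix_in_one_alt,
    List.headD_cons, List.length_cons] at hmain ⊢
  by_cases hp : u.length + 1 < t.length + 1 ∧ a.length = b.length
  · rw [if_pos hp] at hmain
    simp only [if_pos hp]
    have hpad := jm_pad b u (t.length + 1 - (u.length + 1))
    simp only [List.length_cons] at hpad
    rw [hpad]
    simp only [List.map_cons, List.cons_append, List.headD_cons, List.length_append,
      List.length_replicate]
    have hnq : ¬ (t.length + 1 < b.length + (t.length + 1 - (u.length + 1))) := by
      obtain ⟨h1, h2⟩ := hp; obtain ⟨h3, -⟩ := hmain; omega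
    rw [if_neg hnq, if_neg hnq, jm_combine]
    apply List.map_congr_left
    intro i hi
    congr 1
    apply List.map_congr_left
    intro j _
    have hi' : i < u.length + 1 + (t.length + 1 - (u.length + 1)) := by
      have := List.mem_range.mp hi; omega
    have := jm_pad_cell b u (t.length + 1 - (u.length + 1)) i j hi'
    simp only [List.map_cons, List.cons_append] at this
    exact this
  · rw [if_neg hp] at hmain
    simp only [if_neg hp]
    by_cases hq : t.length + 1 < b.length
    · rw [if_pos hq] at hmain
      simp only [if_pos hq, Nat.add_zero]
      obtain ⟨c, v, rfl⟩ : ∃ c v, u = c :: v := by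
        cases u with
        | nil => exact absurd hmain.1 (by simp)
        | cons c v => exact ⟨c, v, rfl⟩
      simp only [List.length_cons] at hmain hp ⊢
      have hpop := jm_pop (b :: c :: v) (v.length + 1 + 1) (by simp)
      rw [hpop]
      rw [show (b :: c :: v).take (v.length + 1 + 1) = b :: c :: v from
            List.take_of_length_le (by simp),
          show (b :: c :: v).drop (v.length + 1 + 1) = [] from
            List.drop_of_length_le (by simp), List.append_nil]
      have hc2 : ((List.map List.dropLast (b :: c :: v)).dropLast).headD [] = b.dropLast := by
        simp [List.dropLast_cons₂]
      rw [hc2, List.length_dropLast, jm_combine]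
      apply List.map_congr_left
      intro i hi
      congr 1
      apply List.map_congr_left
      intro j hj
      have hi' : i < t.length + 1 := List.mem_range.mp hi
      have hj' : j < b.length - 1 := List.mem_range.mp hj
      have hiu : i < v.length + 1 + 1 := by obtain ⟨h1, -⟩ := hmain; omega
      have hrowlen : b.length ≤ ((b :: c :: v).getD i []).length := by
        rw [List.getD_eq_getElem _ _ hiu]
        have := hmain.2.2 _ (jm_take_mem (b :: c :: v) (t.length + 1) i hi' (by simpa using hiu))
        simpa using this
      have hdl1 : ((List.map List.dropLast (b :: c :: v)).dropLast).getD i []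
          = ((b :: c :: v).getD i []).dropLast := by
        rw [jm_getD_dropLast _ _ _ (by simp; omega), jm_getD_map _ _ (by simp; omega)]
      rw [hdl1, jm_getD_dropLast _ 0 j (by omega)]
      simp only [jmCellB, if_pos hiu]
      rw [if_pos (show j < ((b :: c :: v).getD i []).length from by omega)]
    · rw [if_neg hq] at hmain
      simp only [if_neg hq, Nat.add_zero, jm_combine]
      apply List.map_congr_left
      intro i hi
      congr 1
      rcases hmain with hcs | ⟨hrf, hrows⟩
      · rw [hcs]; rfl
      apply List.map_congr_left
      intro j hj
      have hi' : i < t.length + 1 := List.mem_range.mp hi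
      have hj' : j < b.length := List.mem_range.mp hj
      have hiu : i < u.length + 1 := by omega
      have hrowlen : b.length ≤ ((b :: u)[i]'hiu).length := by
        have := hrows _ (jm_take_mem (b :: u) (t.length + 1) i hi' (by simpa using hiu))
        simpa using this
      simp only [jmCellB, if_pos hiu, List.getD_eq_getElem (b :: u) [] hiu]
      rw [if_pos (show j < ((b :: u)[i]'hiu).length from by omega)]
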